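-- pv_equiv track=rewrite | github.com/workaarnavagrawal-ship-it/Mark-3 | offr/api/index.py | _parse_offer_pattern
-- ===== SOURCE A (Python) =====
-- from typing import Any, Dict, List, Optional, Tuple
--
-- _GRADE_RANK = {"A*": 6, "A": 5, "B": 4, "C": 3, "D": 2, "E": 1}
--
-- def _parse_offer_pattern(pat: str) -> List[str]:
--     pat = pat.strip().upper()
--     out: List[str] = []
--     i = 0
--     while i < len(pat):
--         if i + 1 < len(pat) and pat[i] == "A" and pat[i + 1] == "*":
--             out.append("A*"); i += 2
--         else:
--             out.append(pat[i]); i += 1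
--     return [g for g in out if g in _GRADE_RANK][:3]
-- ===== SOURCE B (Python) =====
-- import re
--
-- _GRADE_RANK = {"A*": 6, "A": 5, "B": 4, "C": 3, "D": 2, "E": 1}
--
-- def _parse_offer_pattern(pat: str):
--     pat = pat.strip().upper()
--     return [t for t in re.findall(r'A\*|.', pat) if t in _GRADE_RANK][:3]
-- ===== Notes on version B (the rewrite author's own statement) =====
-- stated objective: idiomatic
-- what changed: Replaces the manual index/lookahead while-loop with one-shot regex tokenization re.findall(r'A\*|.') followed by a filter-and-slice comprehension.
import Mathlib
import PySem

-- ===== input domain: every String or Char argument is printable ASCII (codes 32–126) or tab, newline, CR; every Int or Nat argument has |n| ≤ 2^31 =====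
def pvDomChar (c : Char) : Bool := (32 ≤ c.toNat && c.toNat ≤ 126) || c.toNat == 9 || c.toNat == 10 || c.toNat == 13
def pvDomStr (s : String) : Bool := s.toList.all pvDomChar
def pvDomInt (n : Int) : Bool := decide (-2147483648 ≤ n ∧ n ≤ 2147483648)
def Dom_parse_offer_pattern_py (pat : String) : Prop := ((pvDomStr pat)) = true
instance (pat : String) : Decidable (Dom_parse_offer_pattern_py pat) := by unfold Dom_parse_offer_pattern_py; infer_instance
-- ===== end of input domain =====

-- B replaces A's manual index/lookahead loop with one-shot regex tokenization
-- (re.findall(r'A\*|.')) plus a filter-and-slice comprehension (idiomatic; same cost).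


-- ===== PORT A =====
-- _GRADE_RANK = {"A*": 6, "A": 5, "B": 4, "C": 3, "D": 2, "E": 1}
def pvGradeRank : PySem.Dict String Int :=
  PySem.Dict.ofList [("A*", 6), ("A", 5), ("B", 4), ("C", 3), ("D", 2), ("E", 1)]

-- A's while-loop over indices: i advances by 2 on an "A*" match, else by 1.
-- (indices accessed are in range, so getD's default is never read)
def pvAloop (s : List Char) (i : Nat) : List String :=
  if _h : i < s.length then
    if i + 1 < s.length ∧ s.getD i ' ' = 'A' ∧ s.getD (i + 1) ' ' = '*' then
      "A*" :: pvAloop s (i + 2)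
    else
      String.ofList [s.getD i ' '] :: pvAloop s (i + 1)
  else []
termination_by s.length - i

def parse_offer_pattern_py (pat : String) : List String :=
  let s := (PySem.Str.upper (PySem.Str.strip pat)).toList
  PySem.List.slice ((pvAloop s 0).filter (fun g => pvGradeRank.contains g)) none (some 3)

-- ===== PORT B =====
-- re.findall(r'A\*|.', s): at each position the alternation tries "A*" first, then '.'
-- (any char except '\n'); on no match the scanner advances one char. Exact for this
-- regex on the ASCII domain (ported by hand: PySem has no regex primitive).
def pvFindallTok : List Char → List String
  | [] => []
  | c :: rest =>
    match rest with
    | c2 :: rest2 =>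
      if c = 'A' ∧ c2 = '*' then "A*" :: pvFindallTok rest2
      else if c = '\n' then pvFindallTok (c2 :: rest2)
      else String.ofList [c] :: pvFindallTok (c2 :: rest2)
    | [] => if c = '\n' then [] else [String.ofList [c]]

def parse_offer_pattern_py_alt (pat : String) : List String :=
  let s := (PySem.Str.upper (PySem.Str.strip pat)).toList
  PySem.List.slice ((pvFindallTok s).filter (fun g => pvGradeRank.contains g)) none (some 3)

-- ===== PRECONDITION & SPEC =====
def Spec_parse_offer_pattern_py (pat : String) (out : List String) : Prop := out = parse_offer_pattern_py_alt pat
instance (pat : String) (out : List String) : Decidable (Spec_parse_offer_pattern_py pat out) := by unfold Spec_parse_offer_pattern_py; infer_instance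

-- ===== CLAIM (what is proved, stated in full; the proofs are below) =====
def Claim_equal_parse_offer_pattern_py : Prop := ∀ (pat : String), Dom_parse_offer_pattern_py pat → Spec_parse_offer_pattern_py pat (parse_offer_pattern_py pat)

-- ===== LEMMAS AND PROOFS =====

-- "\n" is not a grade, so B's regex skipping '\n' is invisible after the filter.
theorem pvGradeRank_newline : pvGradeRank.contains (String.ofList ['\n']) = false := by decide

-- Core invariant: after filtering to valid grades, A's index loop from i and B's
-- tokenizer on the corresponding suffix agree.
theorem pvFilter_eq (s : List Char) (i : Nat) :
    (pvAloop s i).filter (fun g => pvGradeRank.contains g)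
      = (pvFindallTok (s.drop i)).filter (fun g => pvGradeRank.contains g) := by
  by_cases h : i < s.length
  · have hdrop : s.drop i = s[i] :: s.drop (i + 1) := List.drop_eq_getElem_cons h
    by_cases h2 : i + 1 < s.length
    · have hdrop2 : s.drop (i + 1) = s[i + 1] :: s.drop (i + 2) := List.drop_eq_getElem_cons h2
      rw [pvAloop, dif_pos h, hdrop, hdrop2, pvFindallTok]
      by_cases hm : s[i] = 'A' ∧ s[i + 1] = '*'
      · rw [if_pos ⟨h2, by simp [List.getD_eq_getElem?_getD, h, hm.1], by
            simp [List.getD_eq_getElem?_getD, h2, hm.2]⟩, if_pos hm]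
        simp only [List.filter_cons]
        rw [pvFilter_eq s (i + 2)]
      · rw [if_neg (by
            intro hc
            exact hm ⟨by simpa [List.getD_eq_getElem?_getD, h] using hc.2.1,
                      by simpa [List.getD_eq_getElem?_getD, h2] using hc.2.2⟩),
          if_neg hm, ← hdrop2]
        simp only [List.getD_eq_getElem?_getD, List.getElem?_eq_getElem h, Option.getD_some]
        by_cases hn : s[i] = '\n'
        · rw [if_pos hn, hn]
          simp only [List.filter_cons, pvGradeRank_newline]
          simpa using pvFilter_eq s (i + 1)
        · rw [if_neg hn]
          simp only [List.filter_cons]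
          rw [pvFilter_eq s (i + 1)]
    · have hdrop2 : s.drop (i + 1) = [] := List.drop_eq_nil_of_le (by omega)
      rw [pvAloop, dif_pos h, hdrop, hdrop2, pvFindallTok,
        if_neg (by intro hc; omega)]
      simp only [List.filter_cons, List.getD_eq_getElem?_getD, List.getElem?_eq_getElem h,
        Option.getD_some]
      rw [pvFilter_eq s (i + 1), hdrop2]
      by_cases hn : s[i] = '\n'
      · simp [pvFindallTok, hn,
          show pvGradeRank.contains "\n" = false from pvGradeRank_newline]
      · simp [pvFindallTok, hn, List.filter_cons]
  · rw [pvAloop, dif_neg h, List.drop_eq_nil_of_le (by omega), pvFindallTok]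
termination_by s.length - i

-- ===== VERDICT (by name: the statement is the Claim_ definition above) =====
theorem parse_offer_pattern_py_spec : Claim_equal_parse_offer_pattern_py := by
  intro pat _
  unfold Spec_parse_offer_pattern_py parse_offer_pattern_py parse_offer_pattern_py_alt
  have h := pvFilter_eq (PySem.Str.upper (PySem.Str.strip pat)).toList 0
  rw [List.drop_zero] at h
  simp only
  rw [h]
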